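-- pv_equiv track=rewrite | github.com/yrakcaz/tools | doc_func.py | treatFunction
-- ===== SOURCE A (Python) =====
-- def countCommas(l):
--     count = 0
--     for i in l:
--         if i == ',':
--             count += 1
--     return count
--
-- def getFirstWord(l):
--     ret = ""
--     i = 0
--     while i < len(l) and l[i] != ' ':
--         ret += l[i]
--         i += 1
--     return ret
--
-- def treatFunction(l):
--     ret = "/**\n"
--     ret += "** @fn " + l
--     ret += "** @brief\n"
--     i = 0
--     while i <= countCommas(l) and not "()" in l:
--         ret += "** @param\n"
--         i += 1
--     if getFirstWord(l) != "void":
--         ret += "** @return\n"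
--     ret += "*/\n"
--     ret += l
--     return ret + '\n'
-- ===== SOURCE B (Python) =====
-- def treatFunction(l):
--     commas = 0
--     empty_parens = False
--     prev = None
--     first_done = False
--     first_word = []
--     for c in l:
--         if c == ',':
--             commas += 1
--         if prev == '(' and c == ')':
--             empty_parens = True
--         if not first_done:
--             if c == ' ':
--                 first_done = True
--             else:
--                 first_word.append(c)
--         prev = c
--     params = '' if empty_parens else "** @param\n" * (commas + 1)
--     ret_line = '' if ''.join(first_word) == 'void' else "** @return\n"
--     return "/**\n** @fn " + l + "** @brief\n" + params + ret_line + "*/\n" + l + "\n"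
-- ===== Notes on version B (the rewrite author's own statement) =====
-- stated objective: faster
-- what changed: Replaced A's three separate scans (comma count, empty-parens substring search, first-word extraction) plus the while-loop that re-evaluates the comma count on every iteration with one single fold over the characters maintaining all three facts at once, then assembles the same literal scaffold.
import Mathlib
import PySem

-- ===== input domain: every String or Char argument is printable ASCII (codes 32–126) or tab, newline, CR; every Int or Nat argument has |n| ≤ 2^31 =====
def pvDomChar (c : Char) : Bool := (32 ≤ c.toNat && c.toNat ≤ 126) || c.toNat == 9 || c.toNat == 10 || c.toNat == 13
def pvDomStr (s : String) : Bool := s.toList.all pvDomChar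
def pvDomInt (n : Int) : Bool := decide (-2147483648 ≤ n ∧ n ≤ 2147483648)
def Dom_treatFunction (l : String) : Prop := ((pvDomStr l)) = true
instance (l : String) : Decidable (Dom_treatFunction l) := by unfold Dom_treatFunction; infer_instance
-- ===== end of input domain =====

-- B replaces A's three separate scans plus the while-loop's repeated countCommas calls by one
-- single fold over the characters; same output (proved equal for all inputs).

-- ===== PORT A =====
-- countCommas: for-loop over the characters accumulating a counter
def countCommasA (cs : List Char) (count : Nat) : Nat :=
  match cs with
  | [] => count
  | c :: rest => countCommasA rest (if c = ',' then count + 1 else count)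

def countCommas (l : String) : Nat := countCommasA l.toList 0

-- getFirstWord: while i < len and l[i] != ' ', accumulate l[i]
def getFirstWordA (cs : List Char) : List Char :=
  match cs with
  | [] => []
  | c :: rest => if c = ' ' then [] else c :: getFirstWordA rest

def getFirstWord (l : String) : String := String.mk (getFirstWordA l.toList)

-- '"()" in l': Python substring containment, ported by hand (exact: scans for adjacent '(' ')')
def hasEmptyParens (cs : List Char) : Bool :=
  match cs with
  | [] => false
  | [_] => false
  | a :: b :: rest => (a = '(' && b = ')') || hasEmptyParens (b :: rest)

-- the while-loop: while i <= countCommas(l) and not "()" in l: ret += "** @param\n"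
def paramLoop (cc : Nat) (hasP : Bool) (i : Nat) (ret : String) : String :=
  if i ≤ cc ∧ hasP = false then paramLoop cc hasP (i + 1) (ret ++ "** @param\n") else ret
termination_by cc + 1 - i
decreasing_by omega

def treatFunction (l : String) : String :=
  let ret := "/**\n"
  let ret := ret ++ "** @fn " ++ l
  let ret := ret ++ "** @brief\n"
  let ret := paramLoop (countCommas l) (hasEmptyParens l.toList) 0 ret
  let ret := if getFirstWord l ≠ "void" then ret ++ "** @return\n" else ret
  let ret := ret ++ "*/\n"
  let ret := ret ++ l
  ret ++ "\n"

-- ===== PORT B =====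
-- port of Python string repetition "s" * n
def repeatStr : Nat → String → String
  | 0, _ => ""
  | n + 1, s => s ++ repeatStr n s

structure BState where
  commas : Nat
  parens : Bool
  prev : Option Char
  done : Bool
  word : List Char
deriving Repr, DecidableEq

def bStep (s : BState) (c : Char) : BState :=
  { commas := if c = ',' then s.commas + 1 else s.commas
    parens := if s.prev = some '(' ∧ c = ')' then true else s.parens
    prev := some c
    done := if ¬ s.done ∧ c = ' ' then true else s.done
    word := if ¬ s.done ∧ c ≠ ' ' then s.word ++ [c] else s.word }

def treatFunction_alt (l : String) : String :=
  let s := l.toList.foldl bStep ⟨0, false, none, false, []⟩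
  let params := if s.parens then "" else repeatStr (s.commas + 1) "** @param\n"
  let retLine := if String.mk s.word = "void" then "" else "** @return\n"
  "/**\n** @fn " ++ l ++ "** @brief\n" ++ params ++ retLine ++ "*/\n" ++ l ++ "\n"

-- ===== PRECONDITION & SPEC =====
def Spec_treatFunction (l : String) (out : String) : Prop := out = treatFunction_alt l
instance (l : String) (out : String) : Decidable (Spec_treatFunction l out) := by unfold Spec_treatFunction; infer_instance

-- ===== CLAIM (what is proved, stated in full; the proofs are below) =====
def Claim_equal_treatFunction : Prop := ∀ (l : String), Dom_treatFunction l → Spec_treatFunction l (treatFunction l)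

-- ===== LEMMAS AND PROOFS =====

-- characterisation of the fold's commas component
theorem fold_commas (cs : List Char) (s : BState) :
    (cs.foldl bStep s).commas = countCommasA cs s.commas := by
  induction cs generalizing s with
  | nil => rfl
  | cons c rest ih =>
    simp only [List.foldl]
    rw [ih]
    simp [bStep, countCommasA]

def optCons (p : Option Char) (cs : List Char) : List Char :=
  match p with
  | none => cs
  | some c => c :: cs

theorem hEP_cons_cons (a b : Char) (t : List Char) :
    hasEmptyParens (a :: b :: t) = ((a = '(' && b = ')') || hasEmptyParens (b :: t)) := rfl

-- characterisation of the fold's parens component: boundary pair handled via optCons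
theorem fold_parens (cs : List Char) (s : BState) :
    (cs.foldl bStep s).parens = (s.parens || hasEmptyParens (optCons s.prev cs)) := by
  induction cs generalizing s with
  | nil =>
    cases h : s.prev <;> simp [optCons, hasEmptyParens]
  | cons c rest ih =>
    simp only [List.foldl]
    rw [ih]
    cases hp : s.prev with
    | none =>
      simp [optCons, bStep, hp]
    | some p =>
      simp only [optCons, hEP_cons_cons, bStep, hp]
      by_cases h1 : p = '(' <;> by_cases h2 : c = ')' <;>
        simp [h1, h2]

-- characterisation of the fold's first-word component
theorem fold_word (cs : List Char) (s : BState) :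
    (cs.foldl bStep s).word = if s.done then s.word else s.word ++ getFirstWordA cs := by
  induction cs generalizing s with
  | nil => cases h : s.done <;> simp [getFirstWordA]
  | cons c rest ih =>
    simp only [List.foldl]
    rw [ih]
    simp only [bStep, getFirstWordA]
    by_cases hd : s.done
    · simp [hd]
    · by_cases hc : c = ' '
      · subst hc; simp [hd]
      · simp [hd, hc]

-- the while-loop unrolled: cc+1-i appended copies when no "()" is present, nothing otherwise
theorem paramLoop_true (cc : Nat) (i : Nat) (ret : String) :
    paramLoop cc true i ret = ret := by
  rw [paramLoop]; simp

theorem paramLoop_false (cc : Nat) (i : Nat) (ret : String) (h : i ≤ cc + 1) :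
    paramLoop cc false i ret = ret ++ repeatStr (cc + 1 - i) "** @param\n" := by
  by_cases hle : i ≤ cc
  · rw [paramLoop]
    simp only [hle, true_and]
    rw [paramLoop_false cc (i + 1) _ (by omega)]
    have hstep : cc + 1 - i = (cc + 1 - (i + 1)) + 1 := by omega
    rw [hstep, repeatStr, String.append_assoc]
    simp
  · have hi : i = cc + 1 := by omega
    rw [paramLoop]
    simp [hi, repeatStr]
termination_by cc + 1 - i
decreasing_by omega

theorem treatFunction_eq (l : String) : treatFunction l = treatFunction_alt l := by
  unfold treatFunction treatFunction_alt
  simp only [fold_commas, fold_parens, fold_word]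
  simp only [optCons, Bool.false_or, if_false]
  have hcc : countCommasA l.toList 0 = countCommas l := rfl
  rw [hcc]
  by_cases hp : hasEmptyParens l.toList
  · simp only [hp, paramLoop_true, if_true]
    by_cases hw : String.mk (getFirstWordA l.toList) = "void"
    · simp [getFirstWord, hw, String.append_assoc]
    · simp [getFirstWord, hw, String.append_assoc]
  · simp only [Bool.not_eq_true] at hp
    simp only [hp, if_false]
    rw [paramLoop_false _ _ _ (by omega)]
    simp only [Nat.sub_zero]
    by_cases hw : String.mk (getFirstWordA l.toList) = "void"
    · simp [getFirstWord, hw, String.append_assoc]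
    · simp [getFirstWord, hw, String.append_assoc]

-- ===== VERDICT (by name: the statement is the Claim_ definition above) =====
theorem treatFunction_spec : Claim_equal_treatFunction := by
  intro l _
  exact treatFunction_eq l
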